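-- pv_equiv track=rewrite | github.com/maggielaughter/tester_school_dzien_7 | read_csv_file.py | csv_to_list2
-- ===== SOURCE A (Python) =====
-- def csv_to_list2(csv_file):
--     expected_len = None
--     result=[]
--     for line in csv_file:
--         record = line.rstrip('\r\n').split(',')
--         if expected_len is None:
--             expected_len=len(record)
--         elif len(record) != expected_len:
--             raise ValueError('Malformed CSV file')
--         result.append(record)
--     return result
-- ===== SOURCE B (Python) =====
-- def csv_to_list2(csv_file):
--     records = [line.rstrip('\r\n').split(',') for line in csv_file]
--     widths = {len(r) for r in records}
--     if len(widths) > 1: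
--         raise ValueError('Malformed CSV file')
--     return records
-- ===== Notes on version B (the rewrite author's own statement) =====
-- stated objective: simpler
-- what changed: B builds all records in one comprehension and validates afterwards via the set of distinct row widths, instead of A's interleaved compare-each-row-to-the-first loop with an accumulator and sentinel expected_len.
import Mathlib
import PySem

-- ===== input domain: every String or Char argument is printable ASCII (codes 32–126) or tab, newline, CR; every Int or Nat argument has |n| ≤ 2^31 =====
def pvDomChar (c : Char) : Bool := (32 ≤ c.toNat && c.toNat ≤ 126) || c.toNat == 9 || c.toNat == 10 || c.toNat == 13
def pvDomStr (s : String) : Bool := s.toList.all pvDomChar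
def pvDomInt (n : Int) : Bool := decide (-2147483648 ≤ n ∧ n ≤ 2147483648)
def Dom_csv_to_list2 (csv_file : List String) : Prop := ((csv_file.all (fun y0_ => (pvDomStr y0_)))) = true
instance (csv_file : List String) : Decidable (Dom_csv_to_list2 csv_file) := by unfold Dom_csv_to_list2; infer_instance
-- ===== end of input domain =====

-- B builds all records in one comprehension and validates afterwards via the set of
-- distinct row widths, instead of A's interleaved compare-to-first loop; same results.

-- shared line parser: line.rstrip('\r\n').split(',')  (both Pythons contain this exact expression)
-- rstrip('\r\n') ported by hand (PySem has no chars-argument rstrip): drop trailing '\r'/'\n'; exact.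
def pvParseLine (s : String) : List String :=
  (PySem.Str.split?
    (String.ofList ((s.toList.reverse.dropWhile (fun c => c == '\r' || c == '\n')).reverse))
    ",").getD []

-- ===== PORT A =====
-- A's loop: state (expected_len, result); on width mismatch Python raises ValueError
-- (those inputs are excluded by Pre_); the port returns the accumulator there.
def csvLoopA : Option Nat → List (List String) → List String → List (List String)
  | _, acc, [] => acc
  | expected, acc, l :: ls =>
    let record := pvParseLine l
    match expected with
    | none => csvLoopA (some record.length) (acc ++ [record]) ls
    | some n =>
      if record.length ≠ n then acc  -- raise ValueError('Malformed CSV file')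
      else csvLoopA (some n) (acc ++ [record]) ls

def csv_to_list2 (csv_file : List String) : List (List String) :=
  csvLoopA none [] csv_file

-- ===== PORT B =====
def csv_to_list2_alt (csv_file : List String) : List (List String) :=
  let records := csv_file.map pvParseLine
  let widths : PySem.Set Nat := PySem.Set.ofList (records.map List.length)
  if PySem.Set.len widths > 1 then []  -- raise ValueError('Malformed CSV file')
  else records

-- ===== PRECONDITION & SPEC =====
-- Pre_ excludes exactly the inputs on which A raises ValueError: files whose lines
-- split into differing numbers of fields.
def Pre_csv_to_list2 (csv_file : List String) : Prop :=
  match csv_file with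
  | [] => True
  | h :: t => ∀ s ∈ t, (pvParseLine s).length = (pvParseLine h).length

instance (csv_file : List String) : Decidable (Pre_csv_to_list2 csv_file) := by
  unfold Pre_csv_to_list2
  cases csv_file <;> infer_instance

def pvWitness_csv_to_list2 : List String := ["a,b", "c,d\r\n", ",x"]

def Spec_csv_to_list2 (csv_file : List String) (out : List (List String)) : Prop :=
  out = csv_to_list2_alt csv_file
instance (csv_file : List String) (out : List (List String)) : Decidable (Spec_csv_to_list2 csv_file out) := by
  unfold Spec_csv_to_list2; infer_instance

-- ===== CLAIM (what is proved, stated in full; the proofs are below) =====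
def Claim_equal_csv_to_list2 : Prop :=
  ∀ (csv_file : List String), Dom_csv_to_list2 csv_file → Pre_csv_to_list2 csv_file →
    Spec_csv_to_list2 csv_file (csv_to_list2 csv_file)

-- ===== LEMMAS AND PROOFS =====

theorem csvLoopA_all_eq (n : Nat) :
    ∀ (ls : List String) (acc : List (List String)),
      (∀ s ∈ ls, (pvParseLine s).length = n) →
      csvLoopA (some n) acc ls = acc ++ ls.map pvParseLine := by
  intro ls
  induction ls with
  | nil => intro acc _; simp [csvLoopA]
  | cons l ls ih =>
    intro acc h
    have hl : (pvParseLine l).length = n := h l (by simp)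
    simp only [csvLoopA, hl, ne_eq, not_true_eq_false, if_false]
    rw [ih (acc ++ [pvParseLine l]) (fun s hs => h s (by simp [hs]))]
    simp

theorem foldl_add_const (n : Nat) :
    ∀ (xs : List Nat), (∀ x ∈ xs, x = n) →
      List.foldl PySem.Set.add [n] xs = [n] := by
  intro xs
  induction xs with
  | nil => intro _; rfl
  | cons x xs ih =>
    intro h
    have hx : x = n := h x (by simp)
    have : PySem.Set.add [n] x = [n] := by
      simp [PySem.Set.add, PySem.Set.contains, hx]
    rw [List.foldl_cons, this, ih (fun y hy => h y (by simp [hy]))]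

theorem setOfList_all_eq (n : Nat) (xs : List Nat) (h : ∀ x ∈ xs, x = n) :
    PySem.Set.ofList (n :: xs) = [n] := by
  rw [PySem.Set.ofList_eq_foldl, List.foldl_cons,
    show PySem.Set.add ([] : PySem.Set Nat) n = [n] from rfl,
    foldl_add_const n xs h]

-- ===== VERDICT (by name: the statement is the Claim_ definition above) =====
theorem csv_to_list2_spec : Claim_equal_csv_to_list2 := by
  intro csv_file _ hpre
  unfold Spec_csv_to_list2 csv_to_list2 csv_to_list2_alt
  match csv_file with
  | [] => rfl
  | h :: t =>
    have hpre' : ∀ s ∈ t, (pvParseLine s).length = (pvParseLine h).length := hpre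
    have hA : csvLoopA none [] (h :: t) = (h :: t).map pvParseLine := by
      simp only [csvLoopA]
      rw [csvLoopA_all_eq (pvParseLine h).length t ([] ++ [pvParseLine h]) hpre']
      simp
    have hset : PySem.Set.ofList (((h :: t).map pvParseLine).map List.length)
        = [(pvParseLine h).length] := by
      simp only [List.map_cons, List.map_map]
      exact setOfList_all_eq _ _ (by
        intro x hx
        simp only [List.mem_map, Function.comp] at hx
        obtain ⟨s, hs, rfl⟩ := hx
        exact hpre' s hs)
    simp only [hA, hset, PySem.Set.len]
    norm_num
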